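-- pv_equiv track=rewrite | github.com/StarSein/BaekJoon | 백준/Gold/18513. 샘터/샘터.py | solution
-- ===== SOURCE A (Python) =====
-- from collections import deque
-- from typing import List
--
-- def solution(N: int, K: int, oasis: List[int]) -> int:
--     visit_set = set(oasis)
--     dq = deque(oasis)
--     answer = 0
--     dist = 0
--     home_cnt = 0
--     while dq:
--         dist += 1
--         size = len(dq)
--         for _ in range(size):
--             x = dq.popleft()
--             for nx in (x - 1, x + 1):
--                 if nx not in visit_set:
--                     visit_set.add(nx)
--                     dq.append(nx)
--                     answer += dist
--                     home_cnt += 1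
--                     if home_cnt == K:
--                         return answer
--     return -1
-- ===== SOURCE B (Python) =====
-- def solution(N, K, oasis):
--     # Analytic counting: sort/dedupe the oases, then the number of cells within
--     # distance d of any oasis is a closed formula over adjacent gaps
--     # (interval-union size); charge each distance level by that count difference.
--     if not oasis:
--         return -1
--     xs = sorted(set(oasis))
--
--     def covered(d):
--         # |union of [x-d, x+d]| for the sorted distinct oases
--         total = 2 * d + 1
--         for a, b in zip(xs, xs[1:]):
--             total += min(b - a, 2 * d + 1)
--         return total
--
--     answer = 0
--     placed = 0
--     d = 0
--     prev = covered(0)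
--     while True:
--         d += 1
--         cur = covered(d)
--         new = cur - prev
--         if placed + new >= K:
--             return answer + d * (K - placed)
--         answer += d * new
--         placed += new
--         prev = cur
-- ===== Notes on version B (the rewrite author's own statement) =====
-- stated objective: alternative
-- what changed: A runs a multi-source BFS on the integer line with a deque and a visited hash set, placing houses cell by cell; B never touches individual cells: it sorts and dedupes the oases and computes the number of cells within distance d as a closed interval-union formula over adjacent gaps, charging each distance level by the count difference and the last level analytically.
import Mathlib
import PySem

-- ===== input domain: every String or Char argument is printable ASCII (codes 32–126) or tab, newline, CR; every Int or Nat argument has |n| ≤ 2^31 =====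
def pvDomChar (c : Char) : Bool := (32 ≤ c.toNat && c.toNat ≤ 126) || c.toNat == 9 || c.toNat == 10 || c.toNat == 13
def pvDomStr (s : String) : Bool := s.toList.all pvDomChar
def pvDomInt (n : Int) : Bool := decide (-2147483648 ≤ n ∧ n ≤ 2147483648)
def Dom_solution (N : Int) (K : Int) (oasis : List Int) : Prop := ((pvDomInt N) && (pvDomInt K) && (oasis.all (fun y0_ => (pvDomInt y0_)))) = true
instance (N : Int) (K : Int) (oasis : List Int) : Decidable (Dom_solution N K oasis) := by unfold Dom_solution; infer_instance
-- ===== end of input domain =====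

-- B replaces A's per-cell multi-source BFS (deque + visited hash set) by arithmetic on the
-- sorted distinct oases: the cells within distance d form a union of intervals whose size is
-- a closed formula over adjacent gaps (objective: alternative; same exact values).

-- ===== PORT A =====
-- A's state while looping: (visit_set, cells appended to dq this level, answer, home_cnt).
-- Python's hash set 'visit_set' is modelled by Std.HashSet Int (exact set semantics:
-- membership and no duplicates; O(1) membership so the port evaluates on the generated
-- inputs, whose K reaches 65535 — a list-backed set does not finish there).
-- One popped candidate nx: Python adds nx, appends it, answer += dist, home_cnt += 1 and
-- returns answer as soon as home_cnt == K (the additions before an immediate return are dead).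
def pvStepA (K dist : Int) (st : Std.HashSet Int × List Int × Int × Int) (nx : Int) :
    (Std.HashSet Int × List Int × Int × Int) ⊕ Int :=
  match st with
  | (visit, nd, answer, cnt) =>
    if visit.contains nx then .inl (visit, nd, answer, cnt)
    else if cnt + 1 = K then .inr (answer + dist)
    else .inl (visit.insert nx, nd ++ [nx], answer + dist, cnt + 1)

def pvCellA (K dist : Int) (acc : (Std.HashSet Int × List Int × Int × Int) ⊕ Int) (nx : Int) :
    (Std.HashSet Int × List Int × Int × Int) ⊕ Int :=
  match acc with
  | .inr a => .inr a
  | .inl st => pvStepA K dist st nx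

-- 'size = len(dq); for _ in range(size): x = dq.popleft(); for nx in (x-1, x+1): …':
-- the popped cells of one level are exactly the dq entries present when the level starts,
-- and the appends of the level form the next level's dq.
def pvLevelA (K dist : Int) (dq : List Int) (st : Std.HashSet Int × List Int × Int × Int) :
    (Std.HashSet Int × List Int × Int × Int) ⊕ Int :=
  dq.foldl (fun acc x => [x - 1, x + 1].foldl (pvCellA K dist) acc) (.inl st)

-- 'while dq:' — fueled with K.toNat iterations; under Pre_solution every level places at
-- least two houses, so the fuel is never exhausted (proved below: the 0-fuel case is vacuous).
def pvLoopA (K : Int) (fuel : Nat) (visit : Std.HashSet Int) (dq : List Int)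
    (answer dist cnt : Int) : Int :=
  if dq.isEmpty then -1
  else
    match fuel with
    | 0 => -1
    | fuel + 1 =>
      match pvLevelA K (dist + 1) dq (visit, [], answer, cnt) with
      | .inr ans => ans
      | .inl (v, nd, a, c) => pvLoopA K fuel v nd a (dist + 1) c

def solution (N : Int) (K : Int) (oasis : List Int) : Int :=
  pvLoopA K K.toNat (Std.HashSet.ofList oasis) oasis 0 0 0

-- ===== PORT B =====
-- Source B's covered(d): total = 2*d+1; for a, b in zip(xs, xs[1:]): total += min(b - a, 2*d+1).
def pvF (xs : List Int) (d : Int) : Int :=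
  (xs.zip xs.tail).foldl (fun t p => t + min (p.2 - p.1) (2 * d + 1)) (2 * d + 1)

-- Source B's 'while True' loop over distance levels: state (answer, placed, d, prev);
-- fueled with K.toNat like A's loop (never exhausted under Pre_solution, proved below).
def pvLoopB (K : Int) (xs : List Int) (fuel : Nat) (answer placed d prev : Int) : Int :=
  match fuel with
  | 0 => 0
  | fuel + 1 =>
    let cur := pvF xs (d + 1)
    let nw := cur - prev
    if K ≤ placed + nw then answer + (d + 1) * (K - placed)
    else pvLoopB K xs fuel (answer + (d + 1) * nw) (placed + nw) (d + 1) cur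

-- 'xs = sorted(set(oasis))'
def solution_alt (N : Int) (K : Int) (oasis : List Int) : Int :=
  if oasis.isEmpty then -1
  else
    let xs := PySem.List.sorted (PySem.Set.ofList oasis) (fun x => x) false
    pvLoopB K xs K.toNat 0 0 0 (pvF xs 0)

-- ===== PRECONDITION & SPEC =====
-- Pre_ excludes only inputs on which A never returns: with a nonempty oasis and K ≤ 0,
-- A's 'while dq' loop runs forever (home_cnt starts at 0 and only ever grows past K ≥ 1).
def Pre_solution (N : Int) (K : Int) (oasis : List Int) : Prop := oasis = [] ∨ 1 ≤ K
instance (N : Int) (K : Int) (oasis : List Int) : Decidable (Pre_solution N K oasis) := by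
  unfold Pre_solution; infer_instance

def pvWitness_solution : Int × Int × List Int := (10, 3, [2, 6])

def Spec_solution (N : Int) (K : Int) (oasis : List Int) (out : Int) : Prop :=
  out = solution_alt N K oasis
instance (N : Int) (K : Int) (oasis : List Int) (out : Int) :
    Decidable (Spec_solution N K oasis out) := by unfold Spec_solution; infer_instance

-- ===== CLAIM (what is proved, stated in full; the proofs are below) =====
def Claim_equal_solution : Prop := ∀ (N : Int) (K : Int) (oasis : List Int),
  Dom_solution N K oasis → Pre_solution N K oasis →
  Spec_solution N K oasis (solution N K oasis)

-- ===== LEMMAS AND PROOFS =====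

-- the candidate stream one level offers, in A's order
def pvCands (l : List Int) : List Int := l.flatMap (fun x => [x - 1, x + 1])

lemma mem_pvCands {y : Int} {l : List Int} :
    y ∈ pvCands l ↔ ∃ a ∈ l, y = a - 1 ∨ y = a + 1 := by
  simp only [pvCands, List.mem_flatMap, List.mem_cons]
  constructor
  · rintro ⟨a, ha, h⟩; exact ⟨a, ha, by tauto⟩
  · rintro ⟨a, ha, h⟩; exact ⟨a, ha, by tauto⟩

lemma foldl_pvCellA_inr (K dist : Int) (cs : List Int) (a : Int) :
    cs.foldl (pvCellA K dist) (.inr a) = .inr a := by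
  induction cs with
  | nil => rfl
  | cons x cs ih => simpa [pvCellA] using ih

lemma pvLevelA_eq_foldl_aux (K dist : Int) (dq : List Int)
    (acc : (Std.HashSet Int × List Int × Int × Int) ⊕ Int) :
    dq.foldl (fun acc x => [x - 1, x + 1].foldl (pvCellA K dist) acc) acc
      = (pvCands dq).foldl (pvCellA K dist) acc := by
  induction dq generalizing acc with
  | nil => rfl
  | cons x dq ih =>
    simp only [pvCands, List.foldl_cons, List.flatMap_cons, List.foldl_append]
    exact ih _

lemma pvLevelA_eq_foldl (K dist : Int) (dq : List Int)
    (st : Std.HashSet Int × List Int × Int × Int) :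
    pvLevelA K dist dq st = (pvCands dq).foldl (pvCellA K dist) (.inl st) :=
  pvLevelA_eq_foldl_aux K dist dq (.inl st)

-- the workhorse: folding A's per-candidate step over a candidate list, starting below K,
-- either returns early with exactly dist·(K−c) more answer, or ends with the new cells
-- being exactly the candidates missing from the visited set S — counted by the Finset
-- difference.  S is the ghost Finset the hash set 'visit' realises (y ∈ V ↔ y ∈ S).
lemma pvRunA (K dist : Int) : ∀ (cs : List Int) (V : Std.HashSet Int) (S : Finset Int)
    (nd : List Int) (ans c : Int),
    (∀ y, y ∈ V ↔ y ∈ S) → nd.Nodup → (∀ y ∈ nd, y ∈ V) → c < K →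
    (K ≤ c + ((cs.toFinset \ S).card : Int) →
      cs.foldl (pvCellA K dist) (.inl (V, nd, ans, c)) = .inr (ans + dist * (K - c)))
    ∧ (¬ K ≤ c + ((cs.toFinset \ S).card : Int) →
      ∃ V' nd', cs.foldl (pvCellA K dist) (.inl (V, nd, ans, c)) =
          .inl (V', nd', ans + dist * ((cs.toFinset \ S).card : Int),
                c + ((cs.toFinset \ S).card : Int))
        ∧ (∀ y, y ∈ V' ↔ y ∈ S ∪ cs.toFinset)
        ∧ nd'.Nodup ∧ nd'.toFinset = nd.toFinset ∪ (cs.toFinset \ S)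
        ∧ (∀ y ∈ nd', y ∈ V')) := by
  intro cs
  induction cs with
  | nil =>
    intro V S nd ans c hVS hnd hndV hcK
    simp only [List.toFinset_nil, Finset.empty_sdiff, Finset.card_empty, Nat.cast_zero,
      add_zero, List.foldl_nil, mul_zero]
    constructor
    · intro h; exact absurd h (by omega)
    · intro _
      exact ⟨V, nd, rfl, by intro y; rw [hVS]; simp, hnd, by simp, hndV⟩
  | cons nx cs ih =>
    intro V S nd ans c hVS hnd hndV hcK
    by_cases hv : nx ∈ V
    · -- already visited: the step is a no-op and nx adds nothing to the difference
      have hstep : pvCellA K dist (.inl (V, nd, ans, c)) nx = .inl (V, nd, ans, c) := by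
        simp [pvCellA, pvStepA, hv]
      have hnxS : nx ∈ S := (hVS nx).mp hv
      have hins : (nx :: cs).toFinset \ S = cs.toFinset \ S := by
        ext y
        simp only [List.toFinset_cons, Finset.mem_sdiff, Finset.mem_insert, List.mem_toFinset]
        constructor
        · rintro ⟨h1 | h1, h2⟩
          · exact absurd (h1 ▸ hnxS) h2
          · exact ⟨h1, h2⟩
        · rintro ⟨h1, h2⟩; exact ⟨Or.inr h1, h2⟩
      have hins2 : S ∪ (nx :: cs).toFinset = S ∪ cs.toFinset := by
        ext y
        simp only [Finset.mem_union, List.toFinset_cons, Finset.mem_insert]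
        constructor
        · rintro (h | h | h)
          · exact Or.inl h
          · exact Or.inl (h ▸ hnxS)
          · exact Or.inr h
        · tauto
      rw [List.foldl_cons, hstep, hins, hins2]
      exact ih V S nd ans c hVS hnd hndV hcK
    · -- a fresh cell
      have hnxS : nx ∉ S := fun h => hv ((hVS nx).mpr h)
      have hmemd : nx ∈ (nx :: cs).toFinset \ S := by
        simp [Finset.mem_sdiff, hnxS]
      by_cases hK1 : c + 1 = K
      · -- this very cell is the K-th house: early return
        have hstep : pvCellA K dist (.inl (V, nd, ans, c)) nx = .inr (ans + dist) := by
          simp [pvCellA, pvStepA, hK1, hv]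
        have hge : K ≤ c + (((nx :: cs).toFinset \ S).card : Int) := by
          have : 1 ≤ ((nx :: cs).toFinset \ S).card := Finset.card_pos.mpr ⟨nx, hmemd⟩
          omega
        constructor
        · intro _
          rw [List.foldl_cons, hstep, foldl_pvCellA_inr]
          congr 1
          have : K - c = 1 := by omega
          rw [this]; ring
        · intro h; exact absurd hge h
      · -- fresh cell, not yet the K-th: add it and continue
        have hcK1 : c + 1 < K := by omega
        have hstep : pvCellA K dist (.inl (V, nd, ans, c)) nx
            = .inl (V.insert nx, nd ++ [nx], ans + dist, c + 1) := by
          simp [pvCellA, pvStepA, hK1, hv]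
        have hVS2 : ∀ y, y ∈ V.insert nx ↔ y ∈ insert nx S := by
          intro y
          simp only [Std.HashSet.mem_insert, beq_iff_eq, Finset.mem_insert, hVS]
          tauto
        have hnd2 : (nd ++ [nx]).Nodup := by
          refine List.Nodup.append hnd (List.nodup_singleton nx) ?_
          intro a ha hb
          rw [List.mem_singleton] at hb
          subst hb; exact hv (hndV a ha)
        have hndV2 : ∀ y ∈ nd ++ [nx], y ∈ V.insert nx := by
          intro y hy
          rw [Std.HashSet.mem_insert]
          rcases List.mem_append.mp hy with h | h
          · exact Or.inr (hndV y h)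
          · have hy' : y = nx := by simpa using h
            exact Or.inl (by simp [hy'])
        -- the counting identity: the whole difference is nx plus the tail's difference
        have hsplit : (nx :: cs).toFinset \ S
            = insert nx (cs.toFinset \ (insert nx S : Finset Int)) := by
          ext y
          simp only [List.toFinset_cons, Finset.mem_sdiff, Finset.mem_insert, List.mem_toFinset]
          constructor
          · rintro ⟨h1 | h1, h2⟩
            · exact Or.inl h1
            · by_cases hynx : y = nx
              · exact Or.inl hynx
              · exact Or.inr ⟨h1, by push_neg; exact ⟨hynx, h2⟩⟩
          · rintro (h1 | ⟨h1, h2⟩)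
            · exact ⟨Or.inl h1, h1 ▸ hnxS⟩
            · push_neg at h2; exact ⟨Or.inr h1, h2.2⟩
        have hnotmem : nx ∉ cs.toFinset \ (insert nx S : Finset Int) := by
          simp [Finset.mem_sdiff]
        have hcard : ((nx :: cs).toFinset \ S).card
            = (cs.toFinset \ (insert nx S : Finset Int)).card + 1 := by
          rw [hsplit, Finset.card_insert_of_notMem hnotmem]
        obtain ⟨ih1, ih2⟩ := ih (V.insert nx) (insert nx S) (nd ++ [nx]) (ans + dist) (c + 1)
          hVS2 hnd2 hndV2 hcK1
        constructor
        · intro h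
          rw [List.foldl_cons, hstep]
          rw [ih1 (by rw [hcard] at h; push_cast at h ⊢; omega)]
          congr 1; ring
        · intro h
          have h2 : ¬ K ≤ c + 1 + ((cs.toFinset \ (insert nx S : Finset Int)).card : Int) := by
            rw [hcard] at h; push_cast at h ⊢; omega
          obtain ⟨V', nd', heq, hV'S, hnd', hndset, hndV'⟩ := ih2 h2
          refine ⟨V', nd', ?_, ?_, hnd', ?_, hndV'⟩
          · rw [List.foldl_cons, hstep, heq]
            have e1 : ans + dist + dist * ((cs.toFinset \ (insert nx S : Finset Int)).card : Int)
                = ans + dist * (((nx :: cs).toFinset \ S).card : Int) := by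
              rw [hcard]; push_cast; ring
            have e2 : c + 1 + ((cs.toFinset \ (insert nx S : Finset Int)).card : Int)
                = c + (((nx :: cs).toFinset \ S).card : Int) := by
              rw [hcard]; push_cast; ring
            rw [e1, e2]
          · intro y
            rw [hV'S y]
            simp only [Finset.mem_union, Finset.mem_insert, List.toFinset_cons]
            tauto
          · rw [hndset, hsplit]
            ext y
            simp only [Finset.mem_union, Finset.mem_insert, List.toFinset_append,
              List.toFinset_cons, List.toFinset_nil, Finset.mem_sdiff, List.mem_toFinset]
            by_cases hynx : y = nx
            · subst hynx; simp [hnxS]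
            · simp [hynx]

-- ===== the ghost geometry: balls of radius d around the oases =====
-- computable integer interval [a, b] as a Finset (Mathlib's Finset.Icc on Int is noncomputable here)
def pvIcc (a b : Int) : Finset Int :=
  (Finset.range (b + 1 - a).toNat).image (fun i : Nat => a + (i : Int))

lemma mem_pvIcc {y a b : Int} : y ∈ pvIcc a b ↔ a ≤ y ∧ y ≤ b := by
  simp only [pvIcc, Finset.mem_image, Finset.mem_range]
  constructor
  · rintro ⟨i, hi, rfl⟩; omega
  · intro h; exact ⟨(y - a).toNat, by omega, by omega⟩

lemma card_pvIcc (a b : Int) : (pvIcc a b).card = (b + 1 - a).toNat := by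
  rw [pvIcc, Finset.card_image_of_injective _ (fun i j h => by omega), Finset.card_range]

def pvBall (xs : List Int) (d : Int) : Finset Int :=
  xs.toFinset.biUnion (fun x => pvIcc (x - d) (x + d))

lemma mem_pvBall {y : Int} {xs : List Int} {d : Int} :
    y ∈ pvBall xs d ↔ ∃ x ∈ xs, x - d ≤ y ∧ y ≤ x + d := by
  simp [pvBall, mem_pvIcc]

lemma pvBall_mono {xs : List Int} {d d' : Int} (h : d ≤ d') :
    pvBall xs d ⊆ pvBall xs d' := by
  intro y hy
  obtain ⟨x, hx, h1, h2⟩ := mem_pvBall.mp hy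
  exact mem_pvBall.mpr ⟨x, hx, by omega, by omega⟩

lemma pvF_cons (x0 x1 : Int) (r : List Int) (d : Int) :
    pvF (x0 :: x1 :: r) d = min (x1 - x0) (2 * d + 1) + pvF (x1 :: r) d := by
  simp only [pvF, List.tail_cons, List.zip_cons_cons, List.foldl_cons]
  rw [PySem.List.foldl_add (g := fun p : Int × Int => min (p.2 - p.1) (2 * d + 1)),
      PySem.List.foldl_add (g := fun p : Int × Int => min (p.2 - p.1) (2 * d + 1))]
  ring

-- B's covered(d) computes |union of the radius-d balls| on a strictly sorted nonempty xs
lemma pvF_card : ∀ (xs : List Int), xs ≠ [] → xs.Pairwise (· < ·) → ∀ d : Int, 0 ≤ d →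
    pvF xs d = ((pvBall xs d).card : Int) := by
  intro xs
  induction xs with
  | nil => intro h; exact absurd rfl h
  | cons x0 t ih =>
    intro _ hs d hd
    cases t with
    | nil =>
      have hb : pvBall [x0] d = pvIcc (x0 - d) (x0 + d) := by
        simp [pvBall]
      rw [hb, card_pvIcc]
      simp only [pvF, List.tail_cons, List.zip_nil_right, List.foldl_nil]
      omega
    | cons x1 r =>
      have hlt : x0 < x1 := (List.pairwise_cons.mp hs).1 x1 (by simp)
      have hall : ∀ x ∈ x1 :: r, x1 ≤ x := by
        intro x hx
        rcases List.mem_cons.mp hx with h | h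
        · omega
        · have := (List.pairwise_cons.mp (List.pairwise_cons.mp hs).2).1 x h
          omega
      have hsplit : pvBall (x0 :: x1 :: r) d
          = pvIcc (x0 - d) (x0 + d) ∪ pvBall (x1 :: r) d := by
        simp [pvBall, Finset.biUnion_insert]
      have hdiff : pvIcc (x0 - d) (x0 + d) \ pvBall (x1 :: r) d
          = pvIcc (x0 - d) (min (x0 + d) (x1 - d - 1)) := by
        ext y
        simp only [Finset.mem_sdiff, mem_pvIcc, mem_pvBall]
        constructor
        · rintro ⟨⟨h1, h2⟩, hn⟩
          have hx1 : ¬(x1 - d ≤ y ∧ y ≤ x1 + d) := fun hc => hn ⟨x1, by simp, hc.1, hc.2⟩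
          push_neg at hx1
          refine ⟨h1, le_min h2 ?_⟩
          omega
        · rintro ⟨h1, h2⟩
          rw [le_min_iff] at h2
          refine ⟨⟨h1, h2.1⟩, ?_⟩
          rintro ⟨x, hx, hb1, hb2⟩
          have := hall x hx
          omega
      rw [pvF_cons, ih (by simp) (List.pairwise_cons.mp hs).2 d hd, hsplit,
        ← Finset.card_sdiff_add_card, hdiff, card_pvIcc]
      push_cast
      omega

-- one BFS level seen geometrically: the fresh candidates are the next ring
lemma pvStepSet (xs dq : List Int) (d : Int) (hd : 0 ≤ d)
    (hdq : dq.toFinset = pvBall xs d \ pvBall xs (d - 1)) :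
    (pvCands dq).toFinset \ pvBall xs d = pvBall xs (d + 1) \ pvBall xs d := by
  have hmem : ∀ a : Int, a ∈ dq ↔ a ∈ pvBall xs d ∧ a ∉ pvBall xs (d - 1) := by
    intro a
    rw [← List.mem_toFinset, hdq, Finset.mem_sdiff]
  ext y
  simp only [Finset.mem_sdiff, List.mem_toFinset]
  constructor
  · rintro ⟨hy, hn⟩
    refine ⟨?_, hn⟩
    obtain ⟨a, ha, hya⟩ := mem_pvCands.mp hy
    obtain ⟨ha1, -⟩ := (hmem a).mp ha
    obtain ⟨x, hx, hb1, hb2⟩ := mem_pvBall.mp ha1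
    rcases hya with h | h <;> exact mem_pvBall.mpr ⟨x, hx, by omega, by omega⟩
  · rintro ⟨hy1, hy2⟩
    refine ⟨?_, hy2⟩
    obtain ⟨x, hx, hb1, hb2⟩ := mem_pvBall.mp hy1
    have hyx : ¬(x - d ≤ y ∧ y ≤ x + d) := fun hc => hy2 (mem_pvBall.mpr ⟨x, hx, hc⟩)
    push_neg at hyx
    by_cases hside : y < x - d
    · have ha : (y + 1) ∈ dq := by
        refine (hmem _).mpr ⟨mem_pvBall.mpr ⟨x, hx, by omega, by omega⟩, ?_⟩
        intro hc
        obtain ⟨x', hx', hb1', hb2'⟩ := mem_pvBall.mp hc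
        exact hy2 (mem_pvBall.mpr ⟨x', hx', by omega, by omega⟩)
      exact mem_pvCands.mpr ⟨y + 1, ha, Or.inl (by ring)⟩
    · have hgt : x + d < y := by omega
      have ha : (y - 1) ∈ dq := by
        refine (hmem _).mpr ⟨mem_pvBall.mpr ⟨x, hx, by omega, by omega⟩, ?_⟩
        intro hc
        obtain ⟨x', hx', hb1', hb2'⟩ := mem_pvBall.mp hc
        exact hy2 (mem_pvBall.mpr ⟨x', hx', by omega, by omega⟩)
      exact mem_pvCands.mpr ⟨y - 1, ha, Or.inr (by ring)⟩

lemma pvUnionBall (xs dq : List Int) (d : Int) (hd : 0 ≤ d)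
    (hdq : dq.toFinset = pvBall xs d \ pvBall xs (d - 1)) :
    pvBall xs d ∪ (pvCands dq).toFinset = pvBall xs (d + 1) := by
  have hstep := pvStepSet xs dq d hd hdq
  ext y
  simp only [Finset.mem_union, List.mem_toFinset]
  constructor
  · rintro (h | h)
    · exact pvBall_mono (by omega) h
    · obtain ⟨a, ha, hya⟩ := mem_pvCands.mp h
      have ha' : a ∈ pvBall xs d := by
        rw [← List.mem_toFinset, hdq, Finset.mem_sdiff] at ha
        exact ha.1
      obtain ⟨x, hx, h1, h2⟩ := mem_pvBall.mp ha'
      rcases hya with h | h <;> exact mem_pvBall.mpr ⟨x, hx, by omega, by omega⟩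
  · intro h
    by_cases hin : y ∈ pvBall xs d
    · exact Or.inl hin
    · right
      have : y ∈ (pvCands dq).toFinset \ pvBall xs d := by
        rw [hstep]; exact Finset.mem_sdiff.mpr ⟨h, hin⟩
      exact List.mem_toFinset.mp (Finset.mem_sdiff.mp this).1

-- the two loops advance in lockstep: one A-level = one B-round, the BFS ball of radius
-- dist being the ghost shared state (A realises it as a hash set, B only as its size).
lemma pvLoopAB (K : Int) (hK : 1 ≤ K) (xs : List Int) (hne : xs ≠ [])
    (hs : xs.Pairwise (· < ·)) :
    ∀ (fuel : Nat) (V : Std.HashSet Int) (dq : List Int) (ans dist c : Int),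
    0 ≤ dist →
    (∀ y, y ∈ V ↔ y ∈ pvBall xs dist) →
    dq.toFinset = pvBall xs dist \ pvBall xs (dist - 1) →
    c < K → 2 * K ≤ c + 2 * (fuel : Int) →
    pvLoopA K fuel V dq ans dist c = pvLoopB K xs fuel ans c dist (pvF xs dist) := by
  intro fuel
  induction fuel with
  | zero =>
    intro V dq ans dist c hd hVS hdq hcK hfuel
    exact absurd hfuel (by push_cast; omega)
  | succ fuel ih =>
    intro V dq ans dist c hd hVS hdq hcK hfuel
    have hxne : xs.toFinset.Nonempty := by
      obtain ⟨a, ha⟩ := List.exists_mem_of_ne_nil xs hne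
      exact ⟨a, List.mem_toFinset.mpr ha⟩
    have hmxs : xs.toFinset.min' hxne ∈ xs := List.mem_toFinset.mp (Finset.min'_mem _ _)
    have hMxs : xs.toFinset.max' hxne ∈ xs := List.mem_toFinset.mp (Finset.max'_mem _ _)
    have hmin : ∀ x ∈ xs, xs.toFinset.min' hxne ≤ x :=
      fun x hx => Finset.min'_le _ _ (List.mem_toFinset.mpr hx)
    have hmax : ∀ x ∈ xs, x ≤ xs.toFinset.max' hxne :=
      fun x hx => Finset.le_max' _ _ (List.mem_toFinset.mpr hx)
    have hmM : xs.toFinset.min' hxne ≤ xs.toFinset.max' hxne := hmax _ hmxs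
    have hmf : xs.toFinset.min' hxne - dist ∈ dq := by
      rw [← List.mem_toFinset, hdq, Finset.mem_sdiff]
      refine ⟨mem_pvBall.mpr ⟨_, hmxs, by omega, by omega⟩, ?_⟩
      intro hc
      obtain ⟨x, hx, h1, h2⟩ := mem_pvBall.mp hc
      have := hmin x hx
      omega
    have hdqne : dq.isEmpty = false := by
      cases dq with
      | nil => simp at hmf
      | cons a l => rfl
    have hstep := pvStepSet xs dq dist hd hdq
    have hsub : pvBall xs dist ⊆ pvBall xs (dist + 1) := pvBall_mono (by omega)
    have hcardsum := Finset.card_sdiff_add_card_eq_card hsub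
    have hF1 := pvF_card xs hne hs dist hd
    have hF2 := pvF_card xs hne hs (dist + 1) (by omega)
    have hnw : pvF xs (dist + 1) - pvF xs dist
        = (((pvCands dq).toFinset \ pvBall xs dist).card : Int) := by
      rw [hF1, hF2, hstep]
      omega
    have h2le : 2 ≤ (pvBall xs (dist + 1) \ pvBall xs dist).card := by
      have hm1 : xs.toFinset.min' hxne - (dist + 1) ∈ pvBall xs (dist + 1) \ pvBall xs dist := by
        rw [Finset.mem_sdiff]
        refine ⟨mem_pvBall.mpr ⟨_, hmxs, by omega, by omega⟩, ?_⟩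
        intro hc
        obtain ⟨x, hx, h1, h2⟩ := mem_pvBall.mp hc
        have := hmin x hx
        omega
      have hM1 : xs.toFinset.max' hxne + (dist + 1) ∈ pvBall xs (dist + 1) \ pvBall xs dist := by
        rw [Finset.mem_sdiff]
        refine ⟨mem_pvBall.mpr ⟨_, hMxs, by omega, by omega⟩, ?_⟩
        intro hc
        obtain ⟨x, hx, h1, h2⟩ := mem_pvBall.mp hc
        have := hmax x hx
        omega
      have hsubp : ({xs.toFinset.min' hxne - (dist + 1), xs.toFinset.max' hxne + (dist + 1)} :
          Finset ℤ) ⊆ pvBall xs (dist + 1) \ pvBall xs dist := by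
        intro y hy
        rcases Finset.mem_insert.mp hy with h | h
        · exact h ▸ hm1
        · exact (Finset.mem_singleton.mp h) ▸ hM1
      have hc2 : ({xs.toFinset.min' hxne - (dist + 1), xs.toFinset.max' hxne + (dist + 1)} :
          Finset ℤ).card = 2 := by
        rw [Finset.card_insert_of_notMem (by rw [Finset.mem_singleton]; omega),
          Finset.card_singleton]
      exact hc2 ▸ Finset.card_le_card hsubp
    rw [pvLoopA, pvLevelA_eq_foldl, pvLoopB]
    simp only [hdqne, Bool.false_eq_true, if_false, hnw]
    have hrun := pvRunA K (dist + 1) (pvCands dq) V (pvBall xs dist) [] ans c hVS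
      List.nodup_nil (by intro y hy; simp at hy) hcK
    by_cases hret : K ≤ c + (((pvCands dq).toFinset \ pvBall xs dist).card : Int)
    · rw [hrun.1 hret, if_pos hret]
    · obtain ⟨V', nd', heq, hV'S, hnd', hndset, hndV'⟩ := hrun.2 hret
      rw [heq, if_neg hret]
      have hcnt2 : 2 ≤ (((pvCands dq).toFinset \ pvBall xs dist).card : Int) := by
        rw [hstep]
        omega
      refine ih V' nd' _ (dist + 1) _ (by omega) ?_ ?_ (by omega) (by push_cast at hfuel ⊢; omega)
      · intro y
        rw [hV'S y, pvUnionBall xs dq dist hd hdq]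
      · rw [hndset]
        have : (dist + 1) - 1 = dist := by ring
        rw [this, hstep]
        simp
  
-- ===== VERDICT (by name: the statement is the Claim_ definition above) =====
theorem solution_spec : Claim_equal_solution := by
  unfold Claim_equal_solution
  intro N K oasis _ hpre
  unfold Spec_solution solution solution_alt
  cases oasis with
  | nil => cases K.toNat <;> rfl
  | cons o os =>
    have hK : 1 ≤ K := by
      rcases hpre with h | h
      · exact absurd h (by simp)
      · exact h
    rw [if_neg (by simp)]
    have hsp : (PySem.List.sorted (PySem.Set.ofList (o :: os)) (fun x => x) false).Pairwise
        (· < ·) := PySem.List.sorted_ofList_pairwise_lt _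
    have hmemxs : ∀ y : Int,
        (y ∈ PySem.List.sorted (PySem.Set.ofList (o :: os)) (fun x => x) false ↔
          y ∈ (o :: os)) := by
      intro y
      rw [PySem.List.mem_sorted, PySem.Set.mem_ofList]
    have hne : PySem.List.sorted (PySem.Set.ofList (o :: os)) (fun x => x) false ≠ [] := by
      intro h
      have ho := (hmemxs o).mpr (by simp)
      rw [h] at ho
      simp at ho
    have h0 : ∀ y : Int,
        (y ∈ pvBall (PySem.List.sorted (PySem.Set.ofList (o :: os)) (fun x => x) false) 0 ↔
          y ∈ (o :: os)) := by
      intro y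
      rw [mem_pvBall]
      constructor
      · rintro ⟨x, hx, h1, h2⟩
        have hyx : y = x := by omega
        exact hyx ▸ (hmemxs x).mp hx
      · intro hy
        exact ⟨y, (hmemxs y).mpr hy, by omega, by omega⟩
    refine pvLoopAB K hK _ hne hsp K.toNat _ _ 0 0 0 (le_refl 0) ?_ ?_ (by omega) ?_
    · intro y
      rw [h0 y]
      simp [Std.HashSet.mem_ofList]
    · have hneg : pvBall (PySem.List.sorted (PySem.Set.ofList (o :: os)) (fun x => x) false)
          ((0 : Int) - 1) = ∅ := by
        ext y
        simp only [mem_pvBall, Finset.notMem_empty, iff_false, not_exists]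
        rintro x ⟨hx, h1, h2⟩
        omega
      ext y
      simp only [List.mem_toFinset, Finset.mem_sdiff, hneg, Finset.notMem_empty,
        not_false_iff, and_true]
      exact (h0 y).symm
    · rw [Int.toNat_of_nonneg (by omega)]
      omega
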